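-- pv_equiv track=rewrite | github.com/cpina00/tech-interview | list/unique_words.py | unique_word
-- ===== SOURCE A (Python) =====
-- def unique_word(words: list[str]) -> list[bool]:
--     result = []
--     for i in range(len(words)):
--         value = True
--         for j in range(i):
--             if words[i] == words[j]:
--                 value = False
--         result.append(value)
--     return result
--     """
--     Aquí recorremos la lista y para cada elemento, contrastamos con los elementos
--     anteriores si existe o no la palabra. de forma que si
--     esta forma de resolverlo, siendo la más intuitiva, es también muy costosa. su
--     complejidad es del orden O(n^2), por tanto, es posible cambiar la solución,
--     utilizando un tipoi de datos más apropiado para esta tarea, una tabla hash o en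
--     python, un diccionario, que tiene coste de busqueda constante.
--     """
-- ===== SOURCE B (Python) =====
-- def unique_word(words: list[str]) -> list[bool]:
--     first = {}
--     for i, w in enumerate(words):
--         if w not in first:
--             first[w] = i
--     return [first[w] == i for i, w in enumerate(words)]
-- ===== Notes on version B (the rewrite author's own statement) =====
-- stated objective: faster
-- what changed: Replaced A's nested backward rescan of all earlier elements per position with a single pass building a dict of each word's first-occurrence index followed by a map comparing each position to that recorded index.
import Mathlib
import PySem

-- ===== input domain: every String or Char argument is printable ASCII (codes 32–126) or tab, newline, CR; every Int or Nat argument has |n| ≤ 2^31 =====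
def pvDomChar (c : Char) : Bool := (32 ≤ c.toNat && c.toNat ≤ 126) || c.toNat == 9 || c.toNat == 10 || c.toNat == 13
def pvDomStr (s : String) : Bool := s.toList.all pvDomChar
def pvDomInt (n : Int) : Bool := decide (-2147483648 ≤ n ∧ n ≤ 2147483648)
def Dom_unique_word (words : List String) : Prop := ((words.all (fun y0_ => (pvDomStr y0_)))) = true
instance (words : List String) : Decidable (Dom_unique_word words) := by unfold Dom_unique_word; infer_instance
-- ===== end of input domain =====

-- B replaces A's quadratic backward rescans by a first-occurrence-index dict built in one pass
-- plus a second pass comparing each position against the recorded first index (objective: faster).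


-- ===== PORT A =====
-- literal transliteration of A's two nested index loops; words[i]/words[j] are always in
-- range (i, j < len(words)), so pyGetD with a dummy default is exact here
def unique_word (words : List String) : List Bool :=
  (PySem.List.pyRange 0 (words.length : Int) 1).foldl
    (fun result i =>
      let value :=
        (PySem.List.pyRange 0 i 1).foldl
          (fun value j =>
            if PySem.List.pyGetD words i "" = PySem.List.pyGetD words j "" then false else value)
          true
      result ++ [value])
    []

-- ===== PORT B =====
-- pass 1: dict word → index of its first occurrence; pass 2: map each (i, w) to first[w] == i.
-- first[w] in pass 2 never misses (w was inserted in pass 1), so getD with a dummy default is exact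
def unique_word_alt (words : List String) : List Bool :=
  let first : PySem.Dict String Int :=
    (PySem.List.enumerate words 0).foldl
      (fun d p => if d.contains p.2 then d else d.insert p.2 p.1)
      PySem.Dict.empty
  (PySem.List.enumerate words 0).map (fun p => decide (first.getD p.2 0 = p.1))

-- ===== PRECONDITION & SPEC =====
def Spec_unique_word (words : List String) (out : List Bool) : Prop := out = unique_word_alt words
instance (words : List String) (out : List Bool) : Decidable (Spec_unique_word words out) := by unfold Spec_unique_word; infer_instance

-- ===== CLAIM (what is proved, stated in full; the proofs are below) =====
def Claim_equal_unique_word : Prop := ∀ (words : List String), Dom_unique_word words → Spec_unique_word words (unique_word words)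

-- ===== LEMMAS AND PROOFS =====

theorem foldl_append_singleton {α β : Type} (g : α → β) (l : List α) (acc : List β) :
    l.foldl (fun r i => r ++ [g i]) acc = acc ++ l.map g := by
  induction l generalizing acc with
  | nil => simp
  | cons x t ih => simp [List.foldl_cons, ih, List.append_assoc]

theorem foldl_false_flag {α : Type} (P : α → Prop) [DecidablePred P] (l : List α) (b : Bool) :
    l.foldl (fun v j => if P j then false else v) b = (b && !(l.any (fun j => decide (P j)))) := by
  induction l generalizing b with
  | nil => simp
  | cons x t ih =>
    simp only [List.foldl_cons, List.any_cons, ih]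
    by_cases h : P x <;> simp [h]

theorem first_dict_get? (l : List (Int × String)) (d : PySem.Dict String Int) (w : String) :
    ((l.foldl (fun d p => if d.contains p.2 then d else d.insert p.2 p.1) d).get? w)
      = ((d.get? w).or (((l.find? (fun p => p.2 == w)).map (·.1)))) := by
  induction l generalizing d with
  | nil => simp
  | cons p t ih =>
    simp only [List.foldl_cons, List.find?_cons]
    by_cases hw : (p.2 == w) = true
    · have heq : p.2 = w := by simpa using hw
      subst heq
      by_cases hc : d.contains p.2 = true
      · rcases hget : d.get? p.2 with _ | v
        · rw [PySem.Dict.contains_eq_isSome_get?, hget] at hc; simp at hc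
        · simp [hc, hw, ih, hget]
      · have hd : d.get? p.2 = none := by
          rw [PySem.Dict.contains_eq_isSome_get?] at hc
          cases hget : d.get? p.2 with
          | none => rfl
          | some v => rw [hget] at hc; simp at hc
        simp [hc, hw, ih, hd, PySem.Dict.get?_insert_self]
    · have heq : p.2 ≠ w := by simpa using hw
      by_cases hc : d.contains p.2 = true
      · simp [hc, hw, ih]
      · simp [hc, hw, ih, PySem.Dict.get?_insert, Ne.symm heq]

theorem find?_enumerate (ws : List String) (s : Int) (w : String) :
    ((PySem.List.enumerate ws s).find? (fun p => p.2 == w)).map (·.1)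
      = (ws.idxOf? w).map (fun k => s + (k : Int)) := by
  induction ws generalizing s with
  | nil => simp [PySem.List.enumerate_nil, List.idxOf?]
  | cons x t ih =>
    rw [PySem.List.enumerate_cons, List.find?_cons]
    by_cases hw : (x == w) = true
    · simp [List.idxOf?_cons, hw]
    · simp only [hw, List.idxOf?_cons, Bool.false_eq_true, if_false]
      rw [ih]
      cases t.idxOf? w <;> simp <;> ring

-- least-index characterisation of idxOf? on a list member
theorem idxOf?_eq_iff_first (ws : List String) (k : Nat) (hk : k < ws.length) :
    ws.idxOf? ws[k] = some k ↔ ∀ j, (hj : j < k) → ws[j]'(Nat.lt_trans hj hk) ≠ ws[k] := by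
  constructor
  · intro h j hj
    have hspec := PySem.List.getElem_of_index?_eq_some (xs := ws) (v := ws[k]) (k := k)
      (by rwa [PySem.List.index?_eq_idxOf?])
    rcases hspec with ⟨_, _, hmin⟩
    exact hmin j hj
  · intro hmin
    rcases hidx : ws.idxOf? ws[k] with _ | m
    · exfalso
      have hmem : ws[k] ∈ ws := List.getElem_mem hk
      rw [← PySem.List.index?_eq_idxOf?] at hidx
      exact absurd ((PySem.List.index?_eq_none_iff _ _).mp hidx) (by simpa using hmem)
    · have hspec := PySem.List.getElem_of_index?_eq_some (xs := ws) (v := ws[k]) (k := m)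
        (by rwa [PySem.List.index?_eq_idxOf?])
      rcases hspec with ⟨hm, hmv, hminm⟩
      rcases lt_trichotomy m k with hlt | heq | hgt
      · exact absurd hmv (hmin m hlt)
      · rw [heq]
      · exact absurd rfl (hminm k hgt)

theorem any_exists (words : List String) (k : Nat) (hk : k < words.length) :
    ((List.range k).any (fun j => decide (words[k]?.getD "" = words[j]?.getD ""))) = true
      ↔ ∃ j, ∃ hj : j < k, words[j]'(Nat.lt_trans hj hk) = words[k] := by
  simp only [List.any_eq_true, List.mem_range, decide_eq_true_eq]
  constructor
  · rintro ⟨j, hj, hbeq⟩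
    refine ⟨j, hj, ?_⟩
    rw [List.getElem?_eq_getElem hk, List.getElem?_eq_getElem (Nat.lt_trans hj hk)] at hbeq
    simpa using hbeq.symm
  · rintro ⟨j, hj, hjeq⟩
    refine ⟨j, hj, ?_⟩
    rw [List.getElem?_eq_getElem hk, List.getElem?_eq_getElem (Nat.lt_trans hj hk)]
    simpa using hjeq.symm

theorem unique_word_eq_canon (words : List String) :
    unique_word words = (List.range words.length).map
      (fun k => !((List.range k).any (fun j => decide (words[k]?.getD "" = words[j]?.getD "")))) := by
  unfold unique_word
  rw [foldl_append_singleton, List.nil_append]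
  apply List.ext_getElem (by simp [PySem.List.length_pyRange_one])
  intro k h1 h2
  have hk : k < words.length := by simpa [PySem.List.length_pyRange_one] using h1
  simp only [List.getElem_map, PySem.List.getElem_pyRange_one, List.getElem_range, zero_add]
  rw [foldl_false_flag]
  simp only [Bool.true_and]
  congr 1
  have hr2 : PySem.List.pyRange 0 (k : Int) 1 = List.map (Nat.cast : Nat → Int) (List.range k) := by
    rw [PySem.List.pyRange_one]; simp
  rw [hr2, List.any_map]
  refine List.any_congr rfl ?_
  intro j
  simp only [Function.comp_apply]
  rw [PySem.List.pyGetD_natCast, PySem.List.pyGetD_natCast]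
  simp [List.getD_eq_getElem?_getD]

theorem unique_word_alt_eq_canon (words : List String) :
    unique_word_alt words = (List.range words.length).map
      (fun k => !((List.range k).any (fun j => decide (words[k]?.getD "" = words[j]?.getD "")))) := by
  unfold unique_word_alt
  apply List.ext_getElem (by simp [PySem.List.length_enumerate])
  intro k h1 h2
  have hk : k < words.length := by simpa [PySem.List.length_enumerate] using h1
  simp only [List.getElem_map, List.getElem_range, PySem.List.getElem_enumerate]
  rw [PySem.Dict.getD_eq_get?_getD, first_dict_get?, PySem.Dict.get?_empty, Option.none_or,
    find?_enumerate]
  have hmem : words[k] ∈ words := List.getElem_mem hk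
  rcases h : words.idxOf? words[k] with _ | m
  · exfalso
    rw [← PySem.List.index?_eq_idxOf?] at h
    exact absurd ((PySem.List.index?_eq_none_iff _ _).mp h) (by simpa using hmem)
  · by_cases hfirst : ∀ j, (hj : j < k) → words[j]'(Nat.lt_trans hj hk) ≠ words[k]
    · have hmk : words.idxOf? words[k] = some k := (idxOf?_eq_iff_first words k hk).mpr hfirst
      rw [h] at hmk
      have hm : m = k := by simpa using hmk
      subst hm
      have hfa : ¬ ((List.range m).any (fun j => decide (words[m]?.getD "" = words[j]?.getD ""))) = true := by
        rw [any_exists words m hk]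
        rintro ⟨j, hj, hjeq⟩
        exact hfirst j hj hjeq
      simp [hfa]
    · push_neg at hfirst
      rcases hfirst with ⟨j, hj, hjeq⟩
      have hne : words.idxOf? words[k] ≠ some k := by
        intro hc
        exact (idxOf?_eq_iff_first words k hk).mp hc j hj hjeq
      rw [h] at hne
      have hmk : m ≠ k := by intro hc; exact hne (by rw [hc])
      have hta : ((List.range k).any (fun j => decide (words[k]?.getD "" = words[j]?.getD ""))) = true := by
        rw [any_exists words k hk]
        exact ⟨j, hj, hjeq⟩
      simp only [hta, Bool.not_true]
      simp [hmk]

-- ===== VERDICT (by name: the statement is the Claim_ definition above) =====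
theorem unique_word_spec : Claim_equal_unique_word := by
  intro words _
  unfold Spec_unique_word
  rw [unique_word_eq_canon, unique_word_alt_eq_canon]
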